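-- pv_equiv track=rewrite | github.com/4D-GRAPHS/4D-GRAPHS-prototype | commons/tuples_from_boolean_df.py | _get_all_tuples_of_given_length_recursive
-- ===== SOURCE A (Python) =====
-- def _get_all_tuples_of_given_length_recursive(l_in, l_out, l_out_index, l_buff, index, length):
--     l = []
--     while l == [] and l_in:
--         l, l_in = l_in[0], l_in[1:]
--         index = index + 1
--
--     if not l_in and l == []:
--         if len(l_out) == length and l_out:
--             return l_buff + [(l_out, l_out_index)]
--         else:
--             return l_buff
--
--     l_buff = _get_all_tuples_of_given_length_recursive(l_in, l_out, l_out_index, l_buff, index, length)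
--
--     for i in l:
--         if i not in l_out:
--             l_buff = _get_all_tuples_of_given_length_recursive(l_in, l_out + [i],
--                                                                l_out_index + [index],
--                                                                l_buff,
--                                                                index,
--                                                                length)
--
--     return l_buff
-- ===== SOURCE B (Python) =====
-- def _get_all_tuples_of_given_length_recursive(l_in, l_out, l_out_index, l_buff, index, length):
--     # Direct-return recursion: helper builds the result list; buffer is prepended once.
--     return l_buff + _tuples_from(l_in, l_out, l_out_index, index, length)
--
--
-- def _tuples_from(l_in, l_out, l_out_index, index, length):
--     # advance past empty sublists
--     while l_in and l_in[0] == []: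
--         l_in = l_in[1:]
--         index = index + 1
--     if not l_in:
--         return [(l_out, l_out_index)] if len(l_out) == length and l_out else []
--     l, rest, index = l_in[0], l_in[1:], index + 1
--     return _tuples_from(rest, l_out, l_out_index, index, length) + [
--         t
--         for i in l
--         if i not in l_out
--         for t in _tuples_from(rest, l_out + [i], l_out_index + [index], index, length)
--     ]
-- ===== Notes on version B (the rewrite author's own statement) =====
-- stated objective: alternative
-- what changed: A threads an accumulator l_buff through every recursive call and mutates it in a for loop; B is a direct-return recursion whose helper builds the result by concatenation (skip-branch result ++ flatMap over the admissible elements) and the incoming buffer is prepended once at the top level.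
import Mathlib
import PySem

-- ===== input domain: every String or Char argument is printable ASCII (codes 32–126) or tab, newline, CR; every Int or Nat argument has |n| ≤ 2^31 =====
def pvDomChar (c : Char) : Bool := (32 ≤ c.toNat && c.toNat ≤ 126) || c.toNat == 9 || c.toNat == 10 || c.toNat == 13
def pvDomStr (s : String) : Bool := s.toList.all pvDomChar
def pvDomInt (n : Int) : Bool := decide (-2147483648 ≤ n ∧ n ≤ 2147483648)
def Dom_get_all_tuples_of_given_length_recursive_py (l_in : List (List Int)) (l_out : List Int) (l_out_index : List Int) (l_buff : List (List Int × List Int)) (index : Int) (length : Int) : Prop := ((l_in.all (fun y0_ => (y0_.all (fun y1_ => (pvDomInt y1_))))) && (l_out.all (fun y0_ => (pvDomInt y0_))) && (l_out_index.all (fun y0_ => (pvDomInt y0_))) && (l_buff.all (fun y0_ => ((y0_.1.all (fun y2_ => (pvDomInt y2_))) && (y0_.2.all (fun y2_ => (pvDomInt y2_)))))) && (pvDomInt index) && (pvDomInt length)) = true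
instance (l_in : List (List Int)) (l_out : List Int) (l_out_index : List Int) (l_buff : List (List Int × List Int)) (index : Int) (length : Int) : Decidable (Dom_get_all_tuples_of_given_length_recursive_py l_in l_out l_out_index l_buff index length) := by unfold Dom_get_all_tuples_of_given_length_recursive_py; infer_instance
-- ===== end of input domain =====

-- B rewrites A's accumulator-threading recursion as a direct-return recursion (results built by
-- concatenation/flatMap, buffer prepended once at the top); objective: alternative decomposition, same cost.

-- ===== PORT A =====
-- the 'while l == [] and l_in' loop of A: returns (l, remaining l_in, index)
def pvSkipA : List (List Int) → Int → (List Int × List (List Int) × Int)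
  | [], index => ([], [], index)
  | x :: rest, index => if x = [] then pvSkipA rest (index + 1) else (x, rest, index + 1)

-- termination fact for A's port, cited in decreasing_by
theorem pvSkipA_lt : ∀ (li : List (List Int)) (i : Int) (l : List Int) (li' : List (List Int)) (i' : Int),
    pvSkipA li i = (l, li', i') → ¬(li' = [] ∧ l = []) → li'.length < li.length := by
  intro li
  induction li with
  | nil => intro i l li' i' h hne; simp [pvSkipA] at h; exact absurd ⟨h.2.1, h.1⟩ hne
  | cons x rest ih =>
    intro i l li' i' h hne
    by_cases hx : x = []
    · simp [pvSkipA, hx] at h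
      exact Nat.lt_trans (ih _ _ _ _ h hne) (Nat.lt_succ_self _)
    · simp [pvSkipA, hx] at h
      simp [← h.2.1, List.length_cons]

def get_all_tuples_of_given_length_recursive_py (l_in : List (List Int)) (l_out : List Int) (l_out_index : List Int) (l_buff : List (List Int × List Int)) (index : Int) (length : Int) : List (List Int × List Int) :=
  match h : pvSkipA l_in index with
  | (l, l_in', index') =>
    if hb : l_in' = [] ∧ l = [] then
      if (l_out.length : Int) = length ∧ l_out ≠ [] then l_buff ++ [(l_out, l_out_index)] else l_buff
    else
      let b1 := get_all_tuples_of_given_length_recursive_py l_in' l_out l_out_index l_buff index' length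
      l.foldl (fun b i =>
        if i ∈ l_out then b
        else get_all_tuples_of_given_length_recursive_py l_in' (l_out ++ [i]) (l_out_index ++ [index']) b index' length) b1
termination_by l_in.length
decreasing_by
  · exact pvSkipA_lt l_in index l l_in' index' h hb
  · exact pvSkipA_lt l_in index l l_in' index' h hb

-- ===== PORT B =====
-- Source B's 'while l_in and l_in[0] == []' loop: drops leading empty sublists
def pvSkipB : List (List Int) → Int → (List (List Int) × Int)
  | [], index => ([], index)
  | x :: rest, index => if x = [] then pvSkipB rest (index + 1) else (x :: rest, index)

theorem pvSkipB_lt : ∀ (li : List (List Int)) (i : Int) (x : List Int) (rest : List (List Int)) (i' : Int),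
    pvSkipB li i = (x :: rest, i') → rest.length < li.length := by
  intro li
  induction li with
  | nil => intro i x rest i' h; simp [pvSkipB] at h
  | cons y t ih =>
    intro i x rest i' h
    by_cases hy : y = []
    · simp [pvSkipB, hy] at h
      exact Nat.lt_trans (ih _ _ _ _ h) (Nat.lt_succ_self _)
    · simp [pvSkipB, hy] at h
      simp [← h.1.2, List.length_cons]

-- Source B's _tuples_from
def pvTuplesFrom (l_in : List (List Int)) (l_out : List Int) (l_out_index : List Int) (index : Int) (length : Int) : List (List Int × List Int) :=
  match h : pvSkipB l_in index with
  | ([], _) => if (l_out.length : Int) = length ∧ l_out ≠ [] then [(l_out, l_out_index)] else []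
  | (l :: rest, index') =>
    pvTuplesFrom rest l_out l_out_index (index' + 1) length ++
      (l.filter (fun i => i ∉ l_out)).flatMap
        (fun i => pvTuplesFrom rest (l_out ++ [i]) (l_out_index ++ [index' + 1]) (index' + 1) length)
termination_by l_in.length
decreasing_by
  · exact pvSkipB_lt l_in index l rest index' h
  · exact pvSkipB_lt l_in index l rest index' h

def get_all_tuples_of_given_length_recursive_py_alt (l_in : List (List Int)) (l_out : List Int) (l_out_index : List Int) (l_buff : List (List Int × List Int)) (index : Int) (length : Int) : List (List Int × List Int) :=
  l_buff ++ pvTuplesFrom l_in l_out l_out_index index length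

-- ===== PRECONDITION & SPEC =====
def Spec_get_all_tuples_of_given_length_recursive_py (l_in : List (List Int)) (l_out : List Int) (l_out_index : List Int) (l_buff : List (List Int × List Int)) (index : Int) (length : Int) (out : List (List Int × List Int)) : Prop := out = get_all_tuples_of_given_length_recursive_py_alt l_in l_out l_out_index l_buff index length
instance (l_in : List (List Int)) (l_out : List Int) (l_out_index : List Int) (l_buff : List (List Int × List Int)) (index : Int) (length : Int) (out : List (List Int × List Int)) : Decidable (Spec_get_all_tuples_of_given_length_recursive_py l_in l_out l_out_index l_buff index length out) := by unfold Spec_get_all_tuples_of_given_length_recursive_py; infer_instance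

-- ===== CLAIM (what is proved, stated in full; the proofs are below) =====
def Claim_equal_get_all_tuples_of_given_length_recursive_py : Prop := ∀ (l_in : List (List Int)) (l_out : List Int) (l_out_index : List Int) (l_buff : List (List Int × List Int)) (index : Int) (length : Int), Dom_get_all_tuples_of_given_length_recursive_py l_in l_out l_out_index l_buff index length → Spec_get_all_tuples_of_given_length_recursive_py l_in l_out l_out_index l_buff index length (get_all_tuples_of_given_length_recursive_py l_in l_out l_out_index l_buff index length)

-- ===== LEMMAS AND PROOFS =====

-- pvSkipA in terms of pvSkipB
theorem skipA_eq_skipB : ∀ (li : List (List Int)) (i : Int),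
    pvSkipA li i = match pvSkipB li i with
      | ([], i') => ([], [], i')
      | (x :: rest, i') => (x, rest, i' + 1) := by
  intro li
  induction li with
  | nil => intro i; simp [pvSkipA, pvSkipB]
  | cons x rest ih =>
    intro i
    by_cases hx : x = [] <;> simp [pvSkipA, pvSkipB, hx, ih]

-- pvSkipB never returns an empty head
theorem skipB_head_ne : ∀ (li : List (List Int)) (i : Int) (x : List Int) (rest : List (List Int)) (i' : Int),
    pvSkipB li i = (x :: rest, i') → x ≠ [] := by
  intro li
  induction li with
  | nil => intro i x rest i' h; simp [pvSkipB] at h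
  | cons y t ih =>
    intro i x rest i' h
    by_cases hy : y = []
    · simp [pvSkipB, hy] at h; exact ih _ _ _ _ h
    · simp [pvSkipB, hy] at h; rw [← h.1.1]; exact hy

-- A's for-loop with a guard and an appending body is 'filter then flatMap'
theorem foldl_guard_append (lo : List Int)
    (f : List (List Int × List Int) → Int → List (List Int × List Int))
    (g : Int → List (List Int × List Int))
    (hf : ∀ (b : List (List Int × List Int)) (i : Int), f b i = if i ∈ lo then b else b ++ g i) :
    ∀ (l : List Int) (acc : List (List Int × List Int)),
      l.foldl f acc = acc ++ (l.filter (fun i => i ∉ lo)).flatMap g := by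
  intro l
  induction l with
  | nil => intro acc; simp
  | cons x t ih =>
    intro acc
    by_cases hx : x ∈ lo <;> simp [List.foldl_cons, hf, hx, ih]

theorem main_equiv : ∀ (n : Nat) (l_in : List (List Int)) (l_out l_out_index : List Int)
    (l_buff : List (List Int × List Int)) (index length : Int), l_in.length ≤ n →
    get_all_tuples_of_given_length_recursive_py l_in l_out l_out_index l_buff index length
      = l_buff ++ pvTuplesFrom l_in l_out l_out_index index length := by
  intro n
  induction n with
  | zero =>
    intro l_in l_out l_out_index l_buff index length hn
    have hin : l_in = [] := List.eq_nil_of_length_eq_zero (Nat.le_zero.mp hn)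
    subst hin
    rw [get_all_tuples_of_given_length_recursive_py, pvTuplesFrom]
    simp [pvSkipA, pvSkipB]
    split_ifs <;> simp
  | succ n ih =>
    intro l_in l_out l_out_index l_buff index length hn
    rw [get_all_tuples_of_given_length_recursive_py, pvTuplesFrom]
    rcases hB : pvSkipB l_in index with ⟨li', i'⟩
    cases li' with
    | nil =>
      have hA : pvSkipA l_in index = ([], [], i') := by rw [skipA_eq_skipB, hB]
      simp [hA]
      split_ifs <;> simp
    | cons x rest =>
      have hA : pvSkipA l_in index = (x, rest, i' + 1) := by rw [skipA_eq_skipB, hB]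
      have hx : x ≠ [] := skipB_head_ne l_in index x rest i' hB
      have hrest : rest.length ≤ n := Nat.lt_succ_iff.mp (Nat.lt_of_lt_of_le (pvSkipB_lt l_in index x rest i' hB) hn)
      simp only [hA]
      rw [dif_neg (by simp [hx])]
      rw [foldl_guard_append l_out _
            (fun i => pvTuplesFrom rest (l_out ++ [i]) (l_out_index ++ [i' + 1]) (i' + 1) length)
            (by
              intro b i
              by_cases hm : i ∈ l_out
              · simp [hm]
              · simp [hm, ih rest (l_out ++ [i]) (l_out_index ++ [i' + 1]) b (i' + 1) length hrest])]
      rw [ih rest l_out l_out_index l_buff (i' + 1) length hrest]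
      simp

-- ===== VERDICT (by name: the statement is the Claim_ definition above) =====
theorem get_all_tuples_of_given_length_recursive_py_spec : Claim_equal_get_all_tuples_of_given_length_recursive_py := by
  intro l_in l_out l_out_index l_buff index length _
  unfold Spec_get_all_tuples_of_given_length_recursive_py get_all_tuples_of_given_length_recursive_py_alt
  exact main_equiv l_in.length l_in l_out l_out_index l_buff index length (Nat.le_refl _)
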